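-- pv_equiv track=rewrite | github.com/hoelzl/clm | src/clm/data_sinks/editscript_data_sink.py | split_all_but_whitespace
-- ===== SOURCE A (Python) =====
-- def split_all_but_whitespace(source: str) -> list[str]:
--     result = []
--     current_word = ""
--     collecting_whitespace = False
--     for char in source:
--         if char.isspace():
--             collecting_whitespace = True
--             current_word += char
--         else:
--             if current_word:
--                 assert (
--                     collecting_whitespace
--                 ), "Current word but not collecting whitespace"
--                 assert current_word.isspace(), "Expected whitespace in current_word"
--                 result.append(current_word)
--                 current_word = ""
--                 collecting_whitespace = False
--             result.append(char)
--     if current_word: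
--         result.append(current_word)
--     return result
-- ===== SOURCE B (Python) =====
-- def split_all_but_whitespace(source: str) -> list[str]:
--     result = []
--     i, n = 0, len(source)
--     while i < n:
--         if source[i].isspace():
--             j = i + 1
--             while j < n and source[j].isspace():
--                 j += 1
--             result.append(source[i:j])
--             i = j
--         else:
--             result.append(source[i])
--             i += 1
--     return result
-- ===== Notes on version B (the rewrite author's own statement) =====
-- stated objective: alternative
-- what changed: Replaced A's per-character flag/accumulator state machine by a run-scanning pass that consumes each maximal whitespace run in one inner scan and slices it out whole, emitting non-space characters directly.
import Mathlib
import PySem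

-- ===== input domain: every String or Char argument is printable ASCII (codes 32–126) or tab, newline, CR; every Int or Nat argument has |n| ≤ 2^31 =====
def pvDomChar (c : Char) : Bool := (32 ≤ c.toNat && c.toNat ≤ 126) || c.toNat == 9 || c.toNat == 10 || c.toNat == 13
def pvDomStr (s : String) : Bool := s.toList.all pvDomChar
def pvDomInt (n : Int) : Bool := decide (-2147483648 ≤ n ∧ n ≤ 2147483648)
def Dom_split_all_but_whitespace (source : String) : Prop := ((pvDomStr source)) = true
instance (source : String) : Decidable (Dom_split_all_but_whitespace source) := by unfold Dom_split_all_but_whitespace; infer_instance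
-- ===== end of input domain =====

-- B replaces A's per-character flag/accumulator state machine by a run-scanning pass
-- that consumes each maximal whitespace run in one inner scan (alternative decomposition, same cost).


-- ===== PORT A =====
-- A's loop: result list, pending whitespace accumulator current_word, collecting flag.
-- (A's two asserts always hold — current_word is only ever whitespace — so they never raise.)
def pvAGo (result : List String) (current_word : List Char) (collecting : Bool) :
    List Char → List String
  | [] => if current_word.isEmpty then result else result ++ [String.ofList current_word]
  | c :: cs =>
    if PySem.Chars.isspace c then
      pvAGo result (current_word ++ [c]) true cs
    else
      if current_word.isEmpty then
        pvAGo (result ++ [String.singleton c]) current_word collecting cs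
      else
        pvAGo (result ++ [String.ofList current_word, String.singleton c]) [] false cs

def split_all_but_whitespace (source : String) : List String :=
  pvAGo [] [] false source.toList

-- ===== PORT B =====
-- B's outer loop: at a whitespace char take the whole maximal run (the inner j-scan =
-- takeWhile/dropWhile of the remaining characters), else emit the single char.
def pvBGo : List Char → List String
  | [] => []
  | c :: cs =>
    if PySem.Chars.isspace c then
      String.ofList (c :: cs.takeWhile PySem.Chars.isspace) ::
        pvBGo (cs.dropWhile PySem.Chars.isspace)
    else
      String.singleton c :: pvBGo cs
termination_by l => l.length
decreasing_by
  · exact Nat.lt_succ_of_le (List.length_dropWhile_le _ _)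
  · simp

def split_all_but_whitespace_alt (source : String) : List String :=
  pvBGo source.toList

-- ===== PRECONDITION & SPEC =====
def Spec_split_all_but_whitespace (source : String) (out : List String) : Prop := out = split_all_but_whitespace_alt source
instance (source : String) (out : List String) : Decidable (Spec_split_all_but_whitespace source out) := by unfold Spec_split_all_but_whitespace; infer_instance

-- ===== CLAIM (what is proved, stated in full; the proofs are below) =====
def Claim_equal_split_all_but_whitespace : Prop := ∀ (source : String), Dom_split_all_but_whitespace source → Spec_split_all_but_whitespace source (split_all_but_whitespace source)

-- ===== LEMMAS AND PROOFS =====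

-- Invariant of A's loop: with pending accumulator cw, A produces `result` followed by
-- the pending run merged into B's leading whitespace run, then B's output of the rest.
theorem pvAGo_eq (cs : List Char) : ∀ (result : List String) (cw : List Char) (b : Bool),
    pvAGo result cw b cs =
      result ++ (if cw.isEmpty then pvBGo cs
                 else String.ofList (cw ++ cs.takeWhile PySem.Chars.isspace) ::
                      pvBGo (cs.dropWhile PySem.Chars.isspace)) := by
  induction cs with
  | nil =>
    intro result cw b
    by_cases h : cw.isEmpty <;> simp [pvAGo, pvBGo, h]
  | cons c cs ih =>
    intro result cw b
    by_cases hsp : PySem.Chars.isspace c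
    · simp only [pvAGo, hsp, if_pos]
      rw [ih]
      by_cases h : cw.isEmpty
      · simp only [List.isEmpty_iff] at h
        subst h
        simp [pvBGo, hsp]
      · simp [h, hsp]
    · have hsp' : PySem.Chars.isspace c = false := by simpa using hsp
      simp only [pvAGo, hsp', Bool.false_eq_true, if_neg, not_false_iff]
      by_cases h : cw.isEmpty
      · simp only [h, if_pos]
        rw [ih]
        simp [pvBGo, hsp', h]
      · simp only [h, Bool.false_eq_true, if_neg, not_false_iff]
        rw [ih]
        simp [pvBGo, hsp']

-- ===== VERDICT (by name: the statement is the Claim_ definition above) =====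
theorem split_all_but_whitespace_spec : Claim_equal_split_all_but_whitespace := by
  intro source _
  unfold Spec_split_all_but_whitespace split_all_but_whitespace split_all_but_whitespace_alt
  rw [pvAGo_eq]
  simp
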